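-- pv_equiv track=rewrite | github.com/tdawson97/Sales-Tracker | Validation/Validation.py | case_check
-- ===== SOURCE A (Python) =====
-- def case_check(word):
--   capital = False
--   lowercase = False
--   for char in word:
--     if not capital and char.isupper():
--       capital = True
--     if not lowercase and char.islower():
--       lowercase = True
--     if capital and lowercase:
--       return True
--   return False
-- ===== SOURCE B (Python) =====
-- def case_check(word):
--   return any(c.isupper() for c in word) and any(c.islower() for c in word)
-- ===== Notes on version B (the rewrite author's own statement) =====
-- stated objective: idiomatic
-- what changed: Replaced the fused flag-tracking early-return loop with two independent existence scans (any isupper, any islower).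
import Mathlib
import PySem

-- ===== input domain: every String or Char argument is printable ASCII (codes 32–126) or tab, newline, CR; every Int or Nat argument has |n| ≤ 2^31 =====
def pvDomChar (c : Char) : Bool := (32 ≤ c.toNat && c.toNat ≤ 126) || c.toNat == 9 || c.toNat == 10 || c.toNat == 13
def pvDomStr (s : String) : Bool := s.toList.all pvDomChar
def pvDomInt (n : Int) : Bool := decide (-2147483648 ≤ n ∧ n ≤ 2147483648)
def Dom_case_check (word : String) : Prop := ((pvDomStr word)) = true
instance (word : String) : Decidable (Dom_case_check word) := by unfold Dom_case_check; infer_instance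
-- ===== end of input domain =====

-- B replaces A's fused flag-tracking early-return loop with two independent existence scans (idiomatic).


-- ===== PORT A =====
-- the for-loop with two mutable flags and an early return, as structural recursion over the chars
def case_check_go (cs : List Char) (capital lowercase : Bool) : Bool :=
  match cs with
  | [] => false
  | c :: rest =>
    let capital := if !capital && PySem.Chars.isupper c then true else capital
    let lowercase := if !lowercase && PySem.Chars.islower c then true else lowercase
    if capital && lowercase then true else case_check_go rest capital lowercase

def case_check (word : String) : Bool :=
  case_check_go word.toList false false

-- ===== PORT B =====
def case_check_alt (word : String) : Bool :=
  word.toList.any (fun c => PySem.Chars.isupper c) &&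
  word.toList.any (fun c => PySem.Chars.islower c)

-- ===== PRECONDITION & SPEC =====
def Spec_case_check (word : String) (out : Bool) : Prop := out = case_check_alt word
instance (word : String) (out : Bool) : Decidable (Spec_case_check word out) := by unfold Spec_case_check; infer_instance

-- ===== CLAIM (what is proved, stated in full; the proofs are below) =====
def Claim_equal_case_check : Prop := ∀ (word : String), Dom_case_check word → Spec_case_check word (case_check word)

-- ===== LEMMAS AND PROOFS =====
-- loop invariant: the fused loop computes "(cap ∨ ∃ upper) ∧ (low ∨ ∃ lower)"
theorem case_check_go_eq (cs : List Char) (cap low : Bool) (h : (cap && low) = false) :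
    case_check_go cs cap low =
      ((cap || cs.any (fun c => PySem.Chars.isupper c)) &&
       (low || cs.any (fun c => PySem.Chars.islower c))) := by
  induction cs generalizing cap low with
  | nil => cases cap <;> cases low <;> simp_all [case_check_go]
  | cons c rest ih =>
    simp only [case_check_go, List.any_cons]
    cases cap <;> cases low <;>
      cases h1 : PySem.Chars.isupper c <;> cases h2 : PySem.Chars.islower c <;>
      simp_all

-- ===== VERDICT (by name: the statement is the Claim_ definition above) =====
theorem case_check_spec : Claim_equal_case_check := by
  intro word _
  unfold Spec_case_check case_check case_check_alt
  rw [case_check_go_eq _ _ _ rfl]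
  simp
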